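-- pv_equiv track=rewrite | github.com/primitivecube/How-to-Think-Like-a-Computer-Scientist-HTTLACS | HTTLACS 10.15 Ex 24 & 25.py | sumUntilEven
-- ===== SOURCE A (Python) =====
-- def sumUntilEven(list):
--     sum = 0
--     for number in list:
--         if number % 2 == 0:
--             break
--         else:
--             sum += number
--             print (sum)
--     return sum
-- ===== SOURCE B (Python) =====
-- def sumUntilEven(list):
--     # Accumulator-free recursion: the running sums of the odd prefix of xs
--     # are xs[0] followed by the tail's running sums each shifted by xs[0].
--     def runningSums(xs):
--         if not xs or xs[0] % 2 == 0:
--             return []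
--         return [xs[0]] + [xs[0] + s for s in runningSums(xs[1:])]
--     sums = runningSums(list)
--     for s in sums:
--         print(s)
--     return sums[-1] if sums else 0
-- ===== Notes on version B (the rewrite author's own statement) =====
-- stated objective: alternative
-- what changed: A's single early-exit loop with a running accumulator is replaced by an accumulator-free structural recursion that builds the whole running-sums list by shifting the tail's running sums by the head element, then prints them and returns the last (0 if empty).
import Mathlib
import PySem

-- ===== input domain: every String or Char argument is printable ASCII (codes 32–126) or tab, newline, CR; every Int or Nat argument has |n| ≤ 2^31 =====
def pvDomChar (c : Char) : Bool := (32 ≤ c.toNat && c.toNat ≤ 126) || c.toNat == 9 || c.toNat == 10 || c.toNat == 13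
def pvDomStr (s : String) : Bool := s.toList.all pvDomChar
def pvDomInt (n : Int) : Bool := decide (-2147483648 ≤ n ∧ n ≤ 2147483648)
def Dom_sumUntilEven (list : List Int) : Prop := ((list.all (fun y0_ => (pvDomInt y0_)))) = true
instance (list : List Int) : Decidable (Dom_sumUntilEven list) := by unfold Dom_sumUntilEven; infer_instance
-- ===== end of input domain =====

-- B replaces A's early-exit accumulating loop by an accumulator-free recursion that builds the running-sums
-- list by shifting the tail's sums; equality is proved for the RETURN value (both print the same running sums,
-- printing is not modelled).
-- ===== PORT A =====
-- the 'for number in list' loop with its early break and accumulator 'sum'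
def sumUntilEvenLoop (sum : Int) : List Int → Int
  | [] => sum
  | n :: rest => if PySem.Int.mod n 2 == 0 then sum else sumUntilEvenLoop (sum + n) rest

def sumUntilEven (list : List Int) : Int := sumUntilEvenLoop 0 list

-- ===== PORT B =====
-- runningSums: [] if the list is empty or starts with an even number,
-- else head followed by the tail's running sums each shifted by the head
def pvRunningSums : List Int → List Int
  | [] => []
  | n :: rest => if PySem.Int.mod n 2 == 0 then [] else n :: (pvRunningSums rest).map (fun s => n + s)

def sumUntilEven_alt (list : List Int) : Int :=
  let sums := pvRunningSums list
  sums.getLastD 0   -- sums[-1] if sums else 0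

-- ===== PRECONDITION & SPEC =====
def Spec_sumUntilEven (list : List Int) (out : Int) : Prop := out = sumUntilEven_alt list
instance (list : List Int) (out : Int) : Decidable (Spec_sumUntilEven list out) := by unfold Spec_sumUntilEven; infer_instance

-- ===== CLAIM (what is proved, stated in full; the proofs are below) =====
def Claim_equal_sumUntilEven : Prop := ∀ (list : List Int), Dom_sumUntilEven list → Spec_sumUntilEven list (sumUntilEven list)

-- ===== LEMMAS AND PROOFS =====

theorem pvGetLastD_map_shift (n : Int) (rs : List Int) : ∀ d : Int,
    (rs.map (fun s => n + s)).getLastD (n + d) = n + rs.getLastD d := by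
  induction rs with
  | nil => intro d; rfl
  | cons a t ih => intro d; simp only [List.map, List.getLastD_cons, ih a]

theorem pvLoop_eq_runningSums (l : List Int) : ∀ s : Int,
    sumUntilEvenLoop s l = s + (pvRunningSums l).getLastD 0 := by
  induction l with
  | nil => intro s; simp [sumUntilEvenLoop, pvRunningSums]
  | cons n rest ih =>
    intro s
    cases hb : (PySem.Int.mod n 2 == 0) with
    | true =>
      simp only [sumUntilEvenLoop, pvRunningSums, hb, if_true]
      simp
    | false =>
      simp only [sumUntilEvenLoop, pvRunningSums, hb, Bool.false_eq_true, if_false,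
        List.getLastD_cons, ih (s + n)]
      have := pvGetLastD_map_shift n (pvRunningSums rest) 0
      rw [add_zero] at this
      rw [this]; ring

-- ===== VERDICT (by name: the statement is the Claim_ definition above) =====
theorem sumUntilEven_spec : Claim_equal_sumUntilEven := by
  intro l _
  unfold Spec_sumUntilEven sumUntilEven sumUntilEven_alt
  simpa using pvLoop_eq_runningSums l 0
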